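-- pv_equiv track=rewrite | github.com/HibaIBegum/CodeSignal | Arcade/Intro/52. longestWord.py | solution
-- ===== SOURCE A (Python) =====
-- def solution(text):
--     longest = []
--     word = []
--     for char in text:
--         if ord("A") <= ord(char) <= ord("Z") or ord("a") <= ord(char) <= ord("z"):
--             word.append(char)
--         else:
--             if len(word) > len(longest):
--                 longest = word
--             word = []
--     if len(word) > len(longest):
--         longest = word
--     return "".join(longest)
-- ===== SOURCE B (Python) =====
-- def solution(text):
--     words = ''.join(c if c.isalpha() else ' ' for c in text).split()
--     return max(words, key=len) if words else ''
-- ===== Notes on version B (the rewrite author's own statement) =====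
-- stated objective: idiomatic
-- what changed: Replaces the manual two-buffer longest-tracking state machine with a tokenize-then-select pipeline: map non-letters to spaces, split into words, take the first longest with max(key=len).
import Mathlib
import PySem

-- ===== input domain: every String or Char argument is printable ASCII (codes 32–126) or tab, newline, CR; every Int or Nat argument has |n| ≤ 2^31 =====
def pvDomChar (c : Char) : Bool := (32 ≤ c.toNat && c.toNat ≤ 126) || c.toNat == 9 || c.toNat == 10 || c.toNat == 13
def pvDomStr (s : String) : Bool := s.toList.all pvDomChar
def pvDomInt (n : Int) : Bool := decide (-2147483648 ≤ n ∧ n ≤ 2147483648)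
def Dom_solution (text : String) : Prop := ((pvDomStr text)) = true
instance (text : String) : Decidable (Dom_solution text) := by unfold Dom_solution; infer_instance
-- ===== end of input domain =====

-- B replaces A's one-pass two-buffer state machine by an idiomatic tokenize-then-select pipeline
-- (map non-letters to spaces, split into words, first longest via max(key=len)); same behaviour.

-- ===== PORT A =====
def solution (text : String) : String :=
  let st := text.toList.foldl
    (fun (s : List Char × List Char) char =>
      if ('A'.toNat ≤ char.toNat ∧ char.toNat ≤ 'Z'.toNat) ∨
         ('a'.toNat ≤ char.toNat ∧ char.toNat ≤ 'z'.toNat) then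
        (s.1, s.2 ++ [char])
      else
        ((if s.2.length > s.1.length then s.2 else s.1), []))
    ([], [])
  -- "".join over a list of single chars is exactly String.ofList
  String.ofList (if st.2.length > st.1.length then st.2 else st.1)

-- ===== PORT B =====
def solution_alt (text : String) : String :=
  let words := PySem.Chars.split₀
    (text.toList.map (fun c => if PySem.Chars.isalpha c then c else ' '))
  match PySem.List.max? words (fun w => w.length) with
  | some w => String.ofList w
  | none => ""

-- ===== PRECONDITION & SPEC =====
def Spec_solution (text : String) (out : String) : Prop := out = solution_alt text
instance (text : String) (out : String) : Decidable (Spec_solution text out) := by unfold Spec_solution; infer_instance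

-- ===== CLAIM (what is proved, stated in full; the proofs are below) =====
def Claim_equal_solution : Prop := ∀ (text : String), Dom_solution text → Spec_solution text (solution text)

-- ===== LEMMAS AND PROOFS =====

-- A's ord-range letter test agrees with Python's str.isalpha on every Char value PySem models
theorem pvAlpha_iff (c : Char) :
    (('A'.toNat ≤ c.toNat ∧ c.toNat ≤ 'Z'.toNat) ∨ ('a'.toNat ≤ c.toNat ∧ c.toNat ≤ 'z'.toNat))
      ↔ PySem.Chars.isalpha c = true := by
  simp only [PySem.Chars.isalpha, PySem.Chars.isupper, PySem.Chars.islower, Bool.or_eq_true,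
    Bool.and_eq_true, decide_eq_true_eq, Char.le_def, UInt32.le_iff_toNat_le]
  exact Iff.rfl

theorem pvAlpha_not_space (c : Char)
    (h : ('A'.toNat ≤ c.toNat ∧ c.toNat ≤ 'Z'.toNat) ∨ ('a'.toNat ≤ c.toNat ∧ c.toNat ≤ 'z'.toNat)) :
    PySem.Chars.isspace c = false := by
  simp only [PySem.Chars.isspace, Bool.or_eq_false_iff, Bool.and_eq_false_iff,
    decide_eq_false_iff_not]
  simp only [show 'A'.toNat = 65 from rfl, show 'Z'.toNat = 90 from rfl,
    show 'a'.toNat = 97 from rfl, show 'z'.toNat = 122 from rfl] at h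
  omega

theorem pvGo_acc (cs : List Char) : ∀ cur acc,
    PySem.Chars.split₀.go cs cur acc = acc.reverse ++ PySem.Chars.split₀.go cs cur [] := by
  induction cs with
  | nil =>
    intro cur acc
    simp [PySem.Chars.split₀.go]
    split <;> simp
  | cons c cs ih =>
    intro cur acc
    simp only [PySem.Chars.split₀.go]
    split
    · split
      · exact ih [] acc
      · rw [ih [] (cur.reverse :: acc), ih [] [cur.reverse]]
        simp
    · exact ih (c :: cur) acc

-- A's selection step: keep the current word only if strictly longer
def pvSel (L w : List Char) : List Char := if w.length > L.length then w else L

theorem pvSel_nil (w : List Char) : pvSel [] w = w := by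
  unfold pvSel
  cases w <;> simp

-- Main invariant: A's fold with state (longest, word) computes the pvSel-fold of longest over
-- the words split₀ extracts from the remaining mapped characters, with word as pending buffer.
theorem pvMain (cs : List Char) : ∀ longest word,
    (let st := cs.foldl
      (fun (s : List Char × List Char) char =>
        if ('A'.toNat ≤ char.toNat ∧ char.toNat ≤ 'Z'.toNat) ∨
           ('a'.toNat ≤ char.toNat ∧ char.toNat ≤ 'z'.toNat) then
          (s.1, s.2 ++ [char])
        else
          ((if s.2.length > s.1.length then s.2 else s.1), []))
      (longest, word)
     if st.2.length > st.1.length then st.2 else st.1)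
    = (PySem.Chars.split₀.go (cs.map (fun c => if PySem.Chars.isalpha c then c else ' '))
        word.reverse []).foldl pvSel longest := by
  induction cs with
  | nil =>
    intro longest word
    simp only [List.foldl_nil, List.map_nil, PySem.Chars.split₀.go]
    by_cases hw : word = []
    · subst hw; simp
    · have hne : word.reverse.isEmpty = false := by simp [hw]
      simp [hne, pvSel]
  | cons c cs ih =>
    intro longest word
    by_cases h : ('A'.toNat ≤ c.toNat ∧ c.toNat ≤ 'Z'.toNat) ∨ ('a'.toNat ≤ c.toNat ∧ c.toNat ≤ 'z'.toNat)
    · have ha : PySem.Chars.isalpha c = true := (pvAlpha_iff c).mp h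
      simp only [List.foldl_cons, List.map_cons, if_pos h, ha, ite_true]
      rw [show (PySem.Chars.split₀.go (c :: cs.map (fun c => if PySem.Chars.isalpha c then c else ' '))
            word.reverse []) = PySem.Chars.split₀.go (cs.map (fun c => if PySem.Chars.isalpha c then c else ' '))
            (c :: word.reverse) [] by
        simp [PySem.Chars.split₀.go, pvAlpha_not_space c h]]
      have := ih longest (word ++ [c])
      simpa using this
    · have ha : PySem.Chars.isalpha c = false := by
        rcases hb : PySem.Chars.isalpha c with _ | _
        · rfl
        · exact absurd ((pvAlpha_iff c).mpr hb) h
      have hs : PySem.Chars.isspace ' ' = true := by decide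
      simp only [List.foldl_cons, List.map_cons, if_neg h, ha, Bool.false_eq_true, ite_false]
      cases word with
      | nil =>
        rw [show (PySem.Chars.split₀.go (' ' :: cs.map (fun c => if PySem.Chars.isalpha c then c else ' '))
              (([] : List Char)).reverse []) =
            PySem.Chars.split₀.go (cs.map (fun c => if PySem.Chars.isalpha c then c else ' ')) [] [] by
          simp [PySem.Chars.split₀.go, hs]]
        have := ih (if ([] : List Char).length > longest.length then [] else longest) []
        simpa using this
      | cons a t =>
        rw [show (PySem.Chars.split₀.go (' ' :: cs.map (fun c => if PySem.Chars.isalpha c then c else ' '))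
              ((a :: t).reverse) []) =
            PySem.Chars.split₀.go (cs.map (fun c => if PySem.Chars.isalpha c then c else ' ')) [] [a :: t] by
          simp [PySem.Chars.split₀.go, hs]]
        rw [pvGo_acc]
        simp only [List.reverse_cons, List.reverse_nil, List.nil_append, List.singleton_append,
          List.foldl_cons]
        have := ih (pvSel longest (a :: t)) []
        simp only [List.reverse_nil] at this
        rw [← this]
        rfl

-- B's running max? over the word list, coerced by getD [], is the same pvSel-fold
theorem pvFold_getD (f : Option (List Char) → List Char → Option (List Char))
    (hf : ∀ m w, f (some m) w = some (pvSel m w)) :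
    ∀ (ws : List (List Char)) (L : List Char),
    (ws.foldl f (some L)).getD [] = ws.foldl pvSel L := by
  intro ws
  induction ws with
  | nil => intro L; rfl
  | cons w ws ih =>
    intro L
    rw [List.foldl_cons, hf, List.foldl_cons]
    exact ih _

theorem pvMax_none (ws : List (List Char)) :
    (PySem.List.max? ws (fun w => w.length)).getD [] = ws.foldl pvSel [] := by
  unfold PySem.List.max?
  cases ws with
  | nil => rfl
  | cons w ws =>
    rw [List.foldl_cons, List.foldl_cons, pvSel_nil]
    exact pvFold_getD _
      (fun m v => by
        show (if m.length < v.length then some v else some m) = some (pvSel m v)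
        unfold pvSel
        rcases Nat.lt_or_ge m.length v.length with hlt | hge
        · rw [if_pos hlt, if_pos hlt]
        · rw [if_neg (Nat.not_lt.mpr hge), if_neg (by omega)])
      ws w

-- ===== VERDICT (by name: the statement is the Claim_ definition above) =====
theorem solution_spec : Claim_equal_solution := by
  intro text _
  unfold Spec_solution solution solution_alt
  rw [show (match PySem.List.max?
        (PySem.Chars.split₀ (text.toList.map (fun c => if PySem.Chars.isalpha c then c else ' ')))
        (fun w => w.length) with
      | some w => String.ofList w
      | none => "") =
      String.ofList ((PySem.List.max?
        (PySem.Chars.split₀ (text.toList.map (fun c => if PySem.Chars.isalpha c then c else ' ')))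
        (fun w => w.length)).getD []) by
    cases PySem.List.max?
        (PySem.Chars.split₀ (text.toList.map (fun c => if PySem.Chars.isalpha c then c else ' ')))
        (fun w => w.length) <;> rfl]
  rw [pvMax_none]
  unfold PySem.Chars.split₀
  have := pvMain text.toList [] []
  simp only [List.reverse_nil] at this
  rw [← this]
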